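-- pv_equiv track=rewrite | github.com/vmud/retail-store-scraper | src/shared/store_schema.py | normalize_store_data
-- ===== SOURCE A (Python) =====
-- from typing import Any, Dict, List, Optional, Set
--
-- FIELD_ALIASES: Dict[str, str] = {
--     # Postal code variations
--     'postal_code': 'zip',
--     'zipcode': 'zip',
--     'zip_code': 'zip',
--     'postalcode': 'zip',
--
--     # Phone number variations
--     'phone_number': 'phone',
--     'telephone': 'phone',
--     'phoneNumber': 'phone',
--     'tel': 'phone',
--
--     # Address variations (less common but possible)
--     'address': 'street_address',
--     'street': 'street_address',
--     'address_line_1': 'street_address',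
--     'streetAddress': 'street_address',
-- }
--
-- def normalize_store_data(store: Dict[str, Any], retailer: str = None) -> Dict[str, Any]:
--     """Normalize a single store's field names to the canonical schema.
--
--     This function takes a store dictionary with retailer-specific field names
--     and normalizes them to the canonical field names defined in FIELD_ALIASES.
--
--     The normalization process:
--     1. Creates a copy of the store data
--     2. For each field alias, if the alias exists in the store:
--        - Renames it to the canonical name
--        - Removes the old alias field
--     3. Adds retailer metadata if provided
--
--     Args:
--         store: Store dictionary with retailer-specific field names
--         retailer: Optional retailer name to add as metadata
--
--     Returns:
--         Normalized store dictionary with canonical field names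
--
--     Examples:
--         >>> store = {'store_id': '123', 'postal_code': '12345', 'phone_number': '555-1234'}
--         >>> normalize_store_data(store)
--         {'store_id': '123', 'zip': '12345', 'phone': '555-1234'}
--
--         >>> store = {'store_id': '456', 'telephone': '555-5678', 'zipcode': '67890'}
--         >>> normalize_store_data(store, retailer='target')
--         {'store_id': '456', 'phone': '555-5678', 'zip': '67890', 'retailer': 'target'}
--     """
--     if not isinstance(store, dict):
--         raise TypeError(f"Expected dict, got {type(store).__name__}")
--
--     # Create a copy to avoid modifying the original
--     normalized = store.copy()
--
--     # Apply field aliases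
--     for alias, canonical in FIELD_ALIASES.items():
--         if alias in normalized:
--             value = normalized.pop(alias)
--             # Only set canonical name if it doesn't already exist
--             # (canonical name takes precedence if both exist)
--             if canonical not in normalized:
--                 normalized[canonical] = value
--
--     # Add retailer metadata if provided and not already present
--     if retailer and 'retailer' not in normalized:
--         normalized['retailer'] = retailer
--
--     return normalized
-- ===== SOURCE B (Python) =====
-- from typing import Any, Dict, Optional
--
-- # Same alias information as the module's FIELD_ALIASES, grouped by canonical name
-- # (aliases listed in FIELD_ALIASES order within each group).
-- CANONICAL_GROUPS = [
--     ('zip', ['postal_code', 'zipcode', 'zip_code', 'postalcode']),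
--     ('phone', ['phone_number', 'telephone', 'phoneNumber', 'tel']),
--     ('street_address', ['address', 'street', 'address_line_1', 'streetAddress']),
-- ]
-- ALIAS_NAMES = frozenset(a for _, aliases in CANONICAL_GROUPS for a in aliases)
--
-- def normalize_store_data(store: Dict[str, Any], retailer: str = None) -> Dict[str, Any]:
--     """Assemble the normalized items as a flat list (kept fields, then one entry
--     per canonical group, then the retailer tag) and build the dict once at the end."""
--     if not isinstance(store, dict):
--         raise TypeError(f"Expected dict, got {type(store).__name__}")
--
--     out = [(k, v) for k, v in store.items() if k not in ALIAS_NAMES]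
--
--     for canonical, aliases in CANONICAL_GROUPS:
--         if canonical not in store:
--             for alias in aliases:          # first alias present wins
--                 if alias in store:
--                     out.append((canonical, store[alias]))
--                     break
--
--     if retailer and 'retailer' not in store:
--         out.append(('retailer', retailer))
--
--     return dict(out)
-- ===== Notes on version B (the rewrite author's own statement) =====
-- stated objective: alternative
-- what changed: B never mutates a dict: it assembles the output as a flat list of pairs (kept non-alias fields, then one entry per canonical group chosen by a first-alias-wins inner loop with break, then the retailer tag) and builds the dict once at the end, instead of A's copy-then-pop/reinsert over the 12-entry alias table.
import Mathlib
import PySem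

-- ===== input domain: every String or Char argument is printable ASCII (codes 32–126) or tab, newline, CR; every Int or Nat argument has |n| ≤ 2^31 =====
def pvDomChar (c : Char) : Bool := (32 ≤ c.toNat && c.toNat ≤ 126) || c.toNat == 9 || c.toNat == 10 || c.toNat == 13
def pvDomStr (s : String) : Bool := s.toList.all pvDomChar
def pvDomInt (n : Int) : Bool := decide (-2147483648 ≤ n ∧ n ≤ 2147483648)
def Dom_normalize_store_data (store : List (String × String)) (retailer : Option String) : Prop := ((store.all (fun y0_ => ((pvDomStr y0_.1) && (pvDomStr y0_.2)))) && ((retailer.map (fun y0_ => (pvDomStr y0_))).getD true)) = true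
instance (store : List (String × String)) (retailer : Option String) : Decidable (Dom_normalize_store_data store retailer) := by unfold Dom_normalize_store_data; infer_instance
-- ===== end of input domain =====

-- B assembles the output as a flat list of pairs (kept fields, then one entry per canonical
-- group via first-alias-wins, then the retailer tag) instead of A's dict pop/reinsert loop.

-- ===== PORT A =====
-- the module constant FIELD_ALIASES as A iterates it
def pvAliases : List (String × String) :=
  [("postal_code", "zip"), ("zipcode", "zip"), ("zip_code", "zip"), ("postalcode", "zip"),
   ("phone_number", "phone"), ("telephone", "phone"), ("phoneNumber", "phone"), ("tel", "phone"),
   ("address", "street_address"), ("street", "street_address"),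
   ("address_line_1", "street_address"), ("streetAddress", "street_address")]

-- one iteration of A's alias loop: pop the alias, reinsert under the canonical name if absent
def pvStepA (d : PySem.Dict String String) (p : String × String) : PySem.Dict String String :=
  if d.contains p.1 then
    match d.pop? p.1 with
    | some (v, d') => if d'.contains p.2 then d' else d'.insert p.2 v
    | none => d
  else d

def normalize_store_data (store : List (String × String)) (retailer : Option String) : List (String × String) :=
  let normalized := PySem.Dict.ofList store   -- store.copy()
  let normalized := pvAliases.foldl pvStepA normalized
  let normalized :=
    match retailer with
    | some r => if r ≠ "" ∧ normalized.contains "retailer" = false then normalized.insert "retailer" r else normalized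
    | none => normalized
  normalized.items

-- ===== PORT B =====
-- the module constant CANONICAL_GROUPS of Source B
def pvGroups : List (String × List String) :=
  [("zip", ["postal_code", "zipcode", "zip_code", "postalcode"]),
   ("phone", ["phone_number", "telephone", "phoneNumber", "tel"]),
   ("street_address", ["address", "street", "address_line_1", "streetAddress"])]

-- the constant ALIAS_NAMES of Source B
def pvAliasNames : List String :=
  ["postal_code", "zipcode", "zip_code", "postalcode",
   "phone_number", "telephone", "phoneNumber", "tel",
   "address", "street", "address_line_1", "streetAddress"]

def normalize_store_data_alt (store : List (String × String)) (retailer : Option String) : List (String × String) :=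
  let d0 := PySem.Dict.ofList store
  -- out = [(k, v) for k, v in store.items() if k not in ALIAS_NAMES]
  let out := d0.items.filter (fun x => !(pvAliasNames.contains x.1))
  -- the group loop; the inner 'first alias present wins' loop with break is findSome?
  let out := out ++ pvGroups.flatMap (fun g =>
      if d0.contains g.1 then []
      else match g.2.findSome? d0.get? with
           | some v => [(g.1, v)]
           | none => [])
  match retailer with
  | some r => if r ≠ "" ∧ d0.contains "retailer" = false then out ++ [("retailer", r)] else out
  | none => out

-- ===== PRECONDITION & SPEC =====
def Spec_normalize_store_data (store : List (String × String)) (retailer : Option String) (out : List (String × String)) : Prop := out = normalize_store_data_alt store retailer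
instance (store : List (String × String)) (retailer : Option String) (out : List (String × String)) : Decidable (Spec_normalize_store_data store retailer out) := by unfold Spec_normalize_store_data; infer_instance

-- ===== CLAIM (what is proved, stated in full; the proofs are below) =====
def Claim_equal_normalize_store_data : Prop := ∀ (store : List (String × String)) (retailer : Option String), Dom_normalize_store_data store retailer → Spec_normalize_store_data store retailer (normalize_store_data store retailer)

-- ===== LEMMAS AND PROOFS =====

-- proof-only intermediate form: B's second pass recast as a fold over the flattened
-- alias table, reading the original dict and appending canonicals if absent
def pvStepB (d0 : PySem.Dict String String) (res : PySem.Dict String String) (p : String × String) : PySem.Dict String String :=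
  match d0.get? p.1 with
  | some v => if res.contains p.2 then res else res.insert p.2 v
  | none => res

theorem pv_beq_comm (a b : String) : (a == b) = (b == a) := by
  by_cases h : a = b
  · simp [h]
  · simp [h, Ne.symm h]

-- find? at key k is unaffected by filtering out key a ≠ k
theorem pv_find?_filter_ne (l : List (String × String)) (a k : String) (h : k ≠ a) :
    (l.filter (fun p => !(p.1 == a))).find? (fun p => p.1 == k) = l.find? (fun p => p.1 == k) := by
  induction l with
  | nil => rfl
  | cons x l ih =>
    by_cases hx : x.1 = a
    · rw [List.filter_cons_of_neg (by simp [hx]), ih, List.find?_cons_of_neg (by simp [hx, Ne.symm h])]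
    · rw [List.filter_cons_of_pos (by simp [hx])]
      by_cases hk : x.1 = k
      · rw [List.find?_cons_of_pos (by simp [hk]), List.find?_cons_of_pos (by simp [hk])]
      · rw [List.find?_cons_of_neg (by simp [hk]), List.find?_cons_of_neg (by simp [hk]), ih]

theorem pv_get?_erase_ne (d : PySem.Dict String String) (a k : String) (h : k ≠ a) :
    (d.erase a).get? k = d.get? k := by
  simp [PySem.Dict.get?, PySem.Dict.erase, pv_find?_filter_ne d.items a k h]

-- membership of key c is unaffected by a filter that keeps every c-keyed entry
theorem pv_any_filter (l : List (String × String)) (P : String × String → Bool) (c : String)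
    (h : ∀ x ∈ l, x.1 = c → P x = true) :
    (l.filter P).any (fun p => p.1 == c) = l.any (fun p => p.1 == c) := by
  induction l with
  | nil => rfl
  | cons x l ih =>
    have ih' := ih (fun y hy => h y (List.mem_cons_of_mem x hy))
    by_cases hx : x.1 = c
    · simp [h x (List.mem_cons_self) hx, List.any_cons, hx]
    · by_cases hP : P x = true
      · simp [hP, List.any_cons, ih']
      · simp [Bool.eq_false_iff.mpr hP, List.any_cons, hx, ih']

-- A's step does not change lookups at keys other than the alias and the canonical name
theorem pv_stepA_get?_ne (d0 : PySem.Dict String String) (a c k : String)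
    (hka : k ≠ a) (hkc : k ≠ c) :
    (pvStepA d0 (a, c)).get? k = d0.get? k := by
  by_cases hA : d0.contains a = true
  · have hs : (d0.get? a).isSome := by rw [← PySem.Dict.contains_eq_isSome_get?]; exact hA
    obtain ⟨v, hv⟩ := Option.isSome_iff_exists.mp hs
    simp only [pvStepA, hA, if_true, PySem.Dict.pop?, hv, Option.map_some]
    split_ifs with hc
    · exact pv_get?_erase_ne d0 a k hka
    · rw [PySem.Dict.get?_insert_of_ne _ v hkc, pv_get?_erase_ne d0 a k hka]
  · simp [pvStepA, hA]

-- the core equivalence of the mutation pass: A's pop-and-reinsert fold over the alias table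
-- equals the append-if-absent fold started from the alias-free dict
theorem pv_fold_eq (AL : List (String × String)) (d0 : PySem.Dict String String)
    (h1 : (AL.map Prod.fst).Nodup)
    (h2 : ∀ p ∈ AL, ∀ q ∈ AL, p.1 ≠ q.2) :
    AL.foldl pvStepA d0 =
      AL.foldl (pvStepB d0)
        (PySem.Dict.mk (d0.items.filter (fun x => !(AL.any (fun q => q.1 == x.1))))) := by
  induction AL generalizing d0 with
  | nil => simp
  | cons pq AL' ih =>
    obtain ⟨a, c⟩ := pq
    simp only [List.map_cons, List.nodup_cons] at h1
    have hmem : (a, c) ∈ (a, c) :: AL' := List.mem_cons_self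
    have hac : a ≠ c := h2 (a, c) hmem (a, c) hmem
    have haAL' : ∀ p ∈ AL', p.1 ≠ a := by
      intro p hp heq
      exact h1.1 (heq ▸ List.mem_map_of_mem (f := Prod.fst) hp)
    have hcAL : ∀ q ∈ (a, c) :: AL', q.1 ≠ c := fun q hq => h2 q hq (a, c) hmem
    have hpc : ∀ p ∈ AL', p.1 ≠ c := fun p hp => hcAL p (List.mem_cons_of_mem _ hp)
    have ih' := ih (pvStepA d0 (a, c)) h1.2
      (fun p hp q hq => h2 p (List.mem_cons_of_mem _ hp) q (List.mem_cons_of_mem _ hq))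
    rw [List.foldl_cons, List.foldl_cons, ih']
    -- replace the fold reading the mutated dict by the fold reading d0
    rw [PySem.List.foldl_congr_mem AL' (pvStepB (pvStepA d0 (a, c))) (pvStepB d0) _
      (by
        intro res p hp
        simp only [pvStepB, pv_stepA_get?_ne d0 a c p.1 (haAL' p hp) (hpc p hp)])]
    -- it remains to show the two start dicts agree
    congr 1
    have hkeepc : ∀ x ∈ d0.items, x.1 = c →
        (!(((a, c) :: AL').any fun q => q.1 == x.1)) = true := by
      intro x _ hx
      simp only [Bool.not_eq_eq_eq_not, Bool.not_true, List.any_eq_false]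
      intro q hq
      simp only [hx]
      simp [hcAL q hq]
    by_cases hA : d0.contains a = true
    · have hs : (d0.get? a).isSome := by rw [← PySem.Dict.contains_eq_isSome_get?]; exact hA
      obtain ⟨v, hv⟩ := Option.isSome_iff_exists.mp hs
      have hfilter : ∀ x ∈ d0.items,
          (((!(AL'.any fun q => q.1 == x.1)) && !(x.1 == a)) : Bool)
            = (!(((a, c) :: AL').any fun q => q.1 == x.1)) := by
        intro x _
        rw [pv_beq_comm x.1 a]
        simp [List.any_cons, Bool.not_or, Bool.and_comm]
      by_cases hc : d0.contains c = true
      · -- the canonical name already exists: A drops the alias, B keeps everything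
        have hdc : (d0.erase a).contains c = true := by
          rw [PySem.Dict.contains_eq_isSome_get?, pv_get?_erase_ne d0 a c (Ne.symm hac),
            ← PySem.Dict.contains_eq_isSome_get?]
          exact hc
        have hresc : (PySem.Dict.mk (d0.items.filter
            (fun x => !(((a, c) :: AL').any fun q => q.1 == x.1)))).contains c = true := by
          simp only [PySem.Dict.contains]
          rw [pv_any_filter _ _ _ hkeepc]
          exact hc
        simp only [pvStepA, hA, if_true, PySem.Dict.pop?, hv, Option.map_some, hdc,
          if_true, pvStepB, hresc]
        apply PySem.Dict.ext
        simp only [PySem.Dict.erase, List.filter_filter]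
        exact List.filter_congr hfilter
      · -- the canonical name is new: both append (c, v) at the end
        have hcb : d0.contains c = false := by simpa using hc
        have hdc : (d0.erase a).contains c = false := by
          rw [PySem.Dict.contains_eq_isSome_get?, pv_get?_erase_ne d0 a c (Ne.symm hac),
            ← PySem.Dict.contains_eq_isSome_get?]
          exact hcb
        have hresc : (PySem.Dict.mk (d0.items.filter
            (fun x => !(((a, c) :: AL').any fun q => q.1 == x.1)))).contains c = false := by
          simp only [PySem.Dict.contains]
          rw [pv_any_filter _ _ _ hkeepc]
          exact hcb
        have hcv : (!(AL'.any fun q => q.1 == c)) = true := by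
          simp only [Bool.not_eq_eq_eq_not, Bool.not_true, List.any_eq_false]
          intro q hq
          simp [hpc q hq]
        simp only [pvStepA, hA, if_true, PySem.Dict.pop?, hv, Option.map_some, hdc,
          Bool.false_eq_true, if_false, pvStepB, hresc]
        apply PySem.Dict.ext
        rw [PySem.Dict.items_insert_of_not_contains _ v hdc,
          PySem.Dict.items_insert_of_not_contains _ v hresc]
        simp only [PySem.Dict.erase]
        rw [List.filter_append, List.filter_filter, List.filter_congr hfilter]
        simp [hcv]
    · have hAf : d0.contains a = false := by simpa using hA
      have hv : d0.get? a = none := by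
        have := hAf
        rw [PySem.Dict.contains_eq_isSome_get?] at this
        simpa using this
      have hfilter : ∀ x ∈ d0.items,
          ((!(AL'.any fun q => q.1 == x.1)) : Bool)
            = (!(((a, c) :: AL').any fun q => q.1 == x.1)) := by
        intro x hx
        have hxa : (x.1 == a) = false := by
          have h0 : ∀ y ∈ d0.items, ¬((fun p => p.1 == a) y = true) :=
            List.any_eq_false.mp (by simpa [PySem.Dict.contains] using hAf)
          simpa using h0 x hx
        have hax : (a == x.1) = false := by rw [pv_beq_comm]; exact hxa
        simp [List.any_cons, hax]
      simp only [pvStepA, hAf, Bool.false_eq_true, if_false, pvStepB, hv]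
      exact congrArg PySem.Dict.mk (List.filter_congr hfilter)

-- one canonical group of the append-if-absent fold: either the canonical name is already
-- there (no change) or the first alias that d0 knows is appended under the canonical name
theorem pv_groupB (d0 res : PySem.Dict String String) (c : String) (as : List String) :
    (as.map (fun a => (a, c))).foldl (pvStepB d0) res =
      if res.contains c then res
      else match as.findSome? d0.get? with
           | some v => res.insert c v
           | none => res := by
  induction as generalizing res with
  | nil => simp
  | cons a as ih =>
    simp only [List.map_cons, List.foldl_cons, List.findSome?_cons]
    by_cases hc : res.contains c = true
    · cases hv : d0.get? a with
      | none => simp only [pvStepB, hv, ih, hc, if_true]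
      | some v => simp only [pvStepB, hv, hc, if_true, ih]
    · have hcf : res.contains c = false := by simpa using hc
      cases hv : d0.get? a with
      | none => simp only [pvStepB, hv, ih, hcf]
      | some v =>
        simp only [pvStepB, hv, hcf, Bool.false_eq_true, if_false, ih,
          PySem.Dict.contains_insert_self, if_true]

-- the whole group loop: folding the flattened groups appends exactly B's tail
theorem pv_groupsB (GS : List (String × List String)) (d0 res : PySem.Dict String String)
    (hc : ∀ g ∈ GS, res.contains g.1 = d0.contains g.1)
    (hnd : (GS.map Prod.fst).Nodup) :
    ((GS.flatMap (fun g => g.2.map (fun a => (a, g.1)))).foldl (pvStepB d0) res).items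
      = res.items ++ GS.flatMap (fun g =>
          if d0.contains g.1 then []
          else match g.2.findSome? d0.get? with
               | some v => [(g.1, v)]
               | none => []) := by
  induction GS generalizing res with
  | nil => simp
  | cons g GS ih =>
    obtain ⟨c, as⟩ := g
    simp only [List.map_cons, List.nodup_cons] at hnd
    have hgc : res.contains c = d0.contains c := hc (c, as) List.mem_cons_self
    have hcrest : ∀ g' ∈ GS, res.contains g'.1 = d0.contains g'.1 :=
      fun g' hg' => hc g' (List.mem_cons_of_mem _ hg')
    simp only [List.flatMap_cons, List.foldl_append, pv_groupB]
    by_cases hd : d0.contains c = true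
    · rw [hgc, hd]
      simp [ih res hcrest hnd.2]
    · have hdf : d0.contains c = false := by simpa using hd
      rw [hgc, hdf]
      simp only [Bool.false_eq_true, if_false]
      cases hv : as.findSome? d0.get? with
      | none => simp [ih res hcrest hnd.2]
      | some v =>
        have hresf : res.contains c = false := by rw [hgc]; exact hdf
        have hc' : ∀ g' ∈ GS, (res.insert c v).contains g'.1 = d0.contains g'.1 := by
          intro g' hg'
          have hne : (g'.1 == c) = false := by
            have : g'.1 ≠ c := by
              intro h
              exact hnd.1 (h ▸ List.mem_map_of_mem (f := Prod.fst) hg')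
            simp [this]
          rw [PySem.Dict.contains_insert, hne, Bool.false_or]
          exact hcrest g' hg'
        rw [ih (res.insert c v) hc' hnd.2,
          PySem.Dict.items_insert_of_not_contains _ v hresf]
        simp

-- the flattened groups are exactly A's alias table
theorem pv_flatten_eq :
    pvGroups.flatMap (fun g => g.2.map (fun a => (a, g.1))) = pvAliases := by decide

-- the two filter predicates agree
theorem pv_pred_eq (s : String) :
    (!(pvAliases.any (fun q => q.1 == s))) = (!(pvAliasNames.contains s)) := by
  simp only [pvAliases, pvAliasNames, List.any_cons, List.any_nil, List.contains_cons,
    List.contains_nil]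
  rw [pv_beq_comm s "postal_code", pv_beq_comm s "zipcode", pv_beq_comm s "zip_code",
    pv_beq_comm s "postalcode", pv_beq_comm s "phone_number", pv_beq_comm s "telephone",
    pv_beq_comm s "phoneNumber", pv_beq_comm s "tel", pv_beq_comm s "address",
    pv_beq_comm s "street", pv_beq_comm s "address_line_1", pv_beq_comm s "streetAddress"]

-- every entry of B's tail is keyed by one of the canonical names
theorem pv_tail_keys (d0 : PySem.Dict String String) (p : String × String)
    (hp : p ∈ pvGroups.flatMap (fun g =>
        if d0.contains g.1 then []
        else match g.2.findSome? d0.get? with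
             | some v => [(g.1, v)]
             | none => [])) : p.1 ∈ pvGroups.map Prod.fst := by
  rw [List.mem_flatMap] at hp
  obtain ⟨g, hg, hpg⟩ := hp
  have : p.1 = g.1 := by
    split at hpg
    · simp at hpg
    · split at hpg
      · simp at hpg
        rw [hpg]
      · simp at hpg
  rw [this]
  exact List.mem_map_of_mem (f := Prod.fst) hg

-- ===== VERDICT (by name: the statement is the Claim_ definition above) =====
theorem normalize_store_data_spec : Claim_equal_normalize_store_data := by
  intro store retailer _
  show normalize_store_data store retailer = normalize_store_data_alt store retailer
  simp only [normalize_store_data, normalize_store_data_alt]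
  set d0 := PySem.Dict.ofList store with hd0
  have hfilt : d0.items.filter (fun x => !(pvAliases.any (fun q => q.1 == x.1)))
      = d0.items.filter (fun x => !(pvAliasNames.contains x.1)) :=
    List.filter_congr (fun x _ => pv_pred_eq x.1)
  have hc0 : ∀ g ∈ pvGroups,
      (PySem.Dict.mk (d0.items.filter (fun x => !(pvAliasNames.contains x.1)))).contains g.1
        = d0.contains g.1 := by
    intro g hg
    simp only [PySem.Dict.contains]
    apply pv_any_filter
    intro x _ hx
    fin_cases hg <;> simp_all <;> decide
  have hitems : (pvAliases.foldl pvStepA d0).items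
      = d0.items.filter (fun x => !(pvAliasNames.contains x.1))
        ++ pvGroups.flatMap (fun g =>
          if d0.contains g.1 then []
          else match g.2.findSome? d0.get? with
               | some v => [(g.1, v)]
               | none => []) := by
    rw [pv_fold_eq pvAliases d0 (by decide) (by decide), hfilt, ← pv_flatten_eq,
      pv_groupsB pvGroups d0 _ hc0 (by decide)]
  have h1 : ((d0.items.filter (fun x => !(pvAliasNames.contains x.1))).any
      (fun p => p.1 == "retailer")) = d0.items.any (fun p => p.1 == "retailer") := by
    apply pv_any_filter
    intro x _ hx
    rw [hx]
    decide
  have h2 : ((pvGroups.flatMap (fun g =>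
      if d0.contains g.1 then []
      else match g.2.findSome? d0.get? with
           | some v => [(g.1, v)]
           | none => [])).any (fun p => p.1 == "retailer")) = false := by
    rw [List.any_eq_false]
    intro p hp
    have := pv_tail_keys d0 p hp
    simp only [pvGroups] at this
    simp at this
    rcases this with h | h | h <;> simp [h]
  have hret : (pvAliases.foldl pvStepA d0).contains "retailer" = d0.contains "retailer" := by
    simp only [PySem.Dict.contains]
    rw [hitems, List.any_append, h1, h2, Bool.or_false]
  cases retailer with
  | none => exact hitems
  | some r =>
    simp only [hret]
    split_ifs with h
    · rw [PySem.Dict.items_insert_of_not_contains _ r (by rw [hret]; exact h.2), hitems]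
    · exact hitems
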